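-- pv_equiv track=rewrite | github.com/DatHoang1009/N_Queens | N_Queens.py | choose_next
-- ===== SOURCE A (Python) =====
-- def is_boulder(i,j,boulderX, boulderY):
--     if i == boulderX:
--         if j == boulderY:
--             return 0
--     return 1
--
-- def succ_state_helper(state, boulderX, boulderY):
--     list1 = []
--     new_state =[]+ state
--     for i in range(len(state)):
--         for j in range(len(state)):
--             if (is_boulder(i,j,boulderX,boulderY) == 1):
--                 new_state[i] = j
--                 temp = [] + new_state
--                 if (temp != state):
--                     list1.append(temp)
--                 new_state = [] + state
--     list1 = sorted(list1, reverse = True)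
--     return list1
--
-- def line_attack(corY, corX, state, boulderX, boulderY):
--     count = 0
--     if (corY == boulderY):
--         if (corX < boulderX):
--             for i in range(0,boulderX-1):
--                 if (state[i] == corY) and (i != corX):
--                     return 1
--         if (corX > boulderX):
--             for j in range(boulderX+1,len(state)):
--                 if (state[j] == corY) and (j != corX):
--                     return 1
--     else:
--         count =+ state.count(corY)
--         if (count >= 2):
--             return 1
--     return 0
--
-- def diagonal_attack(corY, corX, state, boulderX, boulderY):
--     if (abs(corX-boulderX) == abs(corY-boulderY)):
--         if (corX < boulderX):
--             for i in range(0,boulderX):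
--                 if (abs(state[i]-corY) == abs(i-corX)) and (corX !=i):
--                     return 1
--         if (corX > boulderX):
--             for j in range(boulderX, len(state)):
--                 if (abs(state[j]-corY) == abs(j-corX)) and (corX !=j):
--                     return 1
--     else:
--         for j in range(len(state)):
--             if (abs(state[j]-corY) == abs(j-corX)) and (corX !=j):
--                     return 1
--     return 0
--
-- def f(state, boulderX, boulderY):
--     count = 0
--     for i in range(len(state)):
--         if (line_attack(state[i],i,state, boulderX, boulderY) == 1):
--             count = count + 1
--         if (diagonal_attack(state[i],i,state, boulderX, boulderY) == 1):
--             count = count + 1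
--         if (line_attack(state[i],i,state, boulderX, boulderY) == 1) and \
--         (diagonal_attack(state[i],i,state, boulderX, boulderY) == 1):
--             count = count - 1
--     return count
--
-- def choose_next(curr, boulderX, boulderY):
--     state = []
--     temp = f(curr, boulderX, boulderY)
--     list1 = succ_state_helper(curr, boulderX, boulderY)
--     list1.append(curr)
--     list1 = sorted(list1, reverse = True)
--     for i in list1:
--         if (temp >= f(i, boulderX, boulderY)):
--             temp =+ f(i, boulderX, boulderY)
--             state = [] + i
--             if (temp == f(i, boulderX, boulderY)):
--                 if list1.index(curr) > list1.index(i):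
--                     state = [] + i
--     if (state == curr):
--         return None
--     return state
-- ===== SOURCE B (Python) =====
-- def attacked(state, corX, boulderX, boulderY):
--     n = len(state)
--     corY = state[corX]
--     if corY == boulderY:
--         if corX < boulderX and any(state[i] == corY and i != corX for i in range(boulderX - 1)):
--             return True
--         if corX > boulderX and any(state[j] == corY and j != corX for j in range(boulderX + 1, n)):
--             return True
--     else:
--         if state.count(corY) >= 2:
--             return True
--     if abs(corX - boulderX) == abs(corY - boulderY):
--         if corX < boulderX and any(abs(state[i] - corY) == abs(i - corX) and i != corX for i in range(boulderX)):
--             return True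
--         if corX > boulderX and any(abs(state[j] - corY) == abs(j - corX) and j != corX for j in range(boulderX, n)):
--             return True
--         return False
--     return any(abs(state[j] - corY) == abs(j - corX) and j != corX for j in range(n))
--
-- def conflicts(state, boulderX, boulderY):
--     return sum(1 for x in range(len(state)) if attacked(state, x, boulderX, boulderY))
--
-- def choose_next(curr, boulderX, boulderY):
--     n = len(curr)
--     best = curr
--     bestf = conflicts(curr, boulderX, boulderY)
--     for i in range(n):
--         for j in range(n):
--             if (i == boulderX and j == boulderY) or j == curr[i]:
--                 continue
--             cand = curr[:i] + [j] + curr[i + 1:]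
--             fc = conflicts(cand, boulderX, boulderY)
--             if fc < bestf or (fc == bestf and cand < best):
--                 bestf, best = fc, cand
--     return None if best == curr else best
-- ===== Notes on version B (the rewrite author's own statement) =====
-- stated objective: alternative
-- what changed: B drops A's build-all-successors/sort-twice/rescan-with-list.index selection and its three f() calls per candidate: it merges the line/diagonal attack tests into one boolean conflict test evaluated once per candidate and keeps a single running (conflicts, lexicographic) minimum while generating each single-queen-move successor on the fly.
-- outside the precondition, e.g. on choose_next([0, 0], -2, 0): A returns None, B returns None
import Mathlib
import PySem

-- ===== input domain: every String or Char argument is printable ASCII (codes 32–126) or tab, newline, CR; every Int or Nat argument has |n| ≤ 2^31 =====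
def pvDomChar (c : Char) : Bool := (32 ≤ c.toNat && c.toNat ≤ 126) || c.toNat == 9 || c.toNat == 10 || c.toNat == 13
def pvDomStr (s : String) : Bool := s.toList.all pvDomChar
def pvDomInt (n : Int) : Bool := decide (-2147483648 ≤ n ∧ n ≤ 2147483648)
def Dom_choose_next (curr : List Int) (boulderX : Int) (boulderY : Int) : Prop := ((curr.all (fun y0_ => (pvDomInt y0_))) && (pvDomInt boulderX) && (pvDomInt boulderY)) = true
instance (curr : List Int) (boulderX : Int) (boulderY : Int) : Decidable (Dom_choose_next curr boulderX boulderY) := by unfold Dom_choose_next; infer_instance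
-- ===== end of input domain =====

-- B replaces A's sort-twice-and-rescan selection (with its repeated f calls and list.index
-- scans) by a single running (conflicts, lexicographic) minimum over the successor states,
-- generated on the fly: same return value by a different selection algorithm.

-- ===== PORT A =====
def is_boulder (i : Int) (j : Int) (boulderX : Int) (boulderY : Int) : Int :=
  if i = boulderX then (if j = boulderY then 0 else 1) else 1

def succ_state_helper (state : List Int) (boulderX : Int) (boulderY : Int) : List (List Int) :=
  let r := (PySem.List.pyRange 0 (PySem.List.len state) 1).foldl
    (fun (p : List (List Int) × List Int) i =>
      (PySem.List.pyRange 0 (PySem.List.len state) 1).foldl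
        (fun (p : List (List Int) × List Int) j =>
          if is_boulder i j boulderX boulderY = 1 then
            let new_state := PySem.List.pySetD p.2 i j
            let temp := [] ++ new_state
            let list1 := if temp ≠ state then p.1 ++ [temp] else p.1
            (list1, [] ++ state)
          else p) p)
    ([], [] ++ state)
  PySem.List.sorted r.1 (fun x => x) true

def line_attack (corY : Int) (corX : Int) (state : List Int) (boulderX : Int) (boulderY : Int) : Int :=
  -- 'count =+ …' in the source is 'count = +state.count(corY)'
  if corY = boulderY then
    if corX < boulderX ∧ (PySem.List.pyRange 0 (boulderX - 1) 1).any
        (fun i => decide (PySem.List.pyGetD state i 0 = corY ∧ i ≠ corX)) then 1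
    else if corX > boulderX ∧ (PySem.List.pyRange (boulderX + 1) (PySem.List.len state) 1).any
        (fun j => decide (PySem.List.pyGetD state j 0 = corY ∧ j ≠ corX)) then 1
    else 0
  else
    if PySem.List.count state corY ≥ 2 then 1 else 0

def diagonal_attack (corY : Int) (corX : Int) (state : List Int) (boulderX : Int) (boulderY : Int) : Int :=
  if |corX - boulderX| = |corY - boulderY| then
    if corX < boulderX ∧ (PySem.List.pyRange 0 boulderX 1).any
        (fun i => decide (|PySem.List.pyGetD state i 0 - corY| = |i - corX| ∧ corX ≠ i)) then 1
    else if corX > boulderX ∧ (PySem.List.pyRange boulderX (PySem.List.len state) 1).any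
        (fun j => decide (|PySem.List.pyGetD state j 0 - corY| = |j - corX| ∧ corX ≠ j)) then 1
    else 0
  else
    if (PySem.List.pyRange 0 (PySem.List.len state) 1).any
        (fun j => decide (|PySem.List.pyGetD state j 0 - corY| = |j - corX| ∧ corX ≠ j)) then 1
    else 0

def f (state : List Int) (boulderX : Int) (boulderY : Int) : Int :=
  (PySem.List.pyRange 0 (PySem.List.len state) 1).foldl (fun count i =>
    let si := PySem.List.pyGetD state i 0
    let c1 := if line_attack si i state boulderX boulderY = 1 then count + 1 else count
    let c2 := if diagonal_attack si i state boulderX boulderY = 1 then c1 + 1 else c1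
    if line_attack si i state boulderX boulderY = 1 ∧
       diagonal_attack si i state boulderX boulderY = 1 then c2 - 1 else c2) 0

def choose_next (curr : List Int) (boulderX : Int) (boulderY : Int) : Option (List Int) :=
  let temp0 := f curr boulderX boulderY
  let list0 := succ_state_helper curr boulderX boulderY
  let list1 := PySem.List.sorted (list0 ++ [curr]) (fun x => x) true
  let r := list1.foldl (fun (p : Int × List Int) i =>
      if p.1 ≥ f i boulderX boulderY then
        let temp := f i boulderX boulderY
        let state := [] ++ i
        -- 'list1.index(…)' always succeeds here (curr and i are members); '.getD 0' is exact
        let state := if temp = f i boulderX boulderY ∧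
            (PySem.List.index? list1 curr).getD 0 > (PySem.List.index? list1 i).getD 0
          then [] ++ i else state
        (temp, state)
      else p) (temp0, ([] : List Int))
  if r.2 = curr then none else some r.2

-- ===== PORT B =====
def attacked (state : List Int) (corX : Int) (boulderX : Int) (boulderY : Int) : Bool :=
  let n := PySem.List.len state
  let corY := PySem.List.pyGetD state corX 0
  let row : Bool :=
    if corY = boulderY then
      (decide (corX < boulderX) && (PySem.List.pyRange 0 (boulderX - 1) 1).any
        (fun i => decide (PySem.List.pyGetD state i 0 = corY ∧ i ≠ corX))) ||
      (decide (corX > boulderX) && (PySem.List.pyRange (boulderX + 1) n 1).any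
        (fun j => decide (PySem.List.pyGetD state j 0 = corY ∧ j ≠ corX)))
    else decide (PySem.List.count state corY ≥ 2)
  if row then true
  else if |corX - boulderX| = |corY - boulderY| then
    (decide (corX < boulderX) && (PySem.List.pyRange 0 boulderX 1).any
      (fun i => decide (|PySem.List.pyGetD state i 0 - corY| = |i - corX| ∧ corX ≠ i))) ||
    (decide (corX > boulderX) && (PySem.List.pyRange boulderX n 1).any
      (fun j => decide (|PySem.List.pyGetD state j 0 - corY| = |j - corX| ∧ corX ≠ j)))
  else (PySem.List.pyRange 0 n 1).any
    (fun j => decide (|PySem.List.pyGetD state j 0 - corY| = |j - corX| ∧ corX ≠ j))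

def conflicts (state : List Int) (boulderX : Int) (boulderY : Int) : Int :=
  ((PySem.List.pyRange 0 (PySem.List.len state) 1).map
    (fun x => if attacked state x boulderX boulderY then (1 : Int) else 0)).sum

def choose_next_alt (curr : List Int) (boulderX : Int) (boulderY : Int) : Option (List Int) :=
  let n := PySem.List.len curr
  let r := (PySem.List.pyRange 0 n 1).foldl (fun (p : Int × List Int) i =>
      (PySem.List.pyRange 0 n 1).foldl (fun (p : Int × List Int) j =>
        if (i = boulderX ∧ j = boulderY) ∨ j = PySem.List.pyGetD curr i 0 then p
        else
          let cand := PySem.List.slice curr none (some i) ++ [j] ++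
                      PySem.List.slice curr (some (i + 1)) none
          let fc := conflicts cand boulderX boulderY
          if fc < p.1 ∨ (fc = p.1 ∧ cand < p.2) then (fc, cand) else p) p)
    (conflicts curr boulderX boulderY, curr)
  if r.2 = curr then none else some r.2

-- ===== PRECONDITION & SPEC =====
-- Pre_ excludes boulder coordinates outside 0 ≤ boulderX ≤ len(curr) unless no queen row/diagonal
-- can ever align with the boulder: outside it A's guarded helper loops (range(0, boulderX-1),
-- range(boulderX+1, n), …) may overrun the board and raise IndexError or read via Python's
-- negative-index wraparound, and whether they actually do depends on the scans' early exits,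
-- which has no closed form; the second disjunct keeps the far-away-boulder inputs A returns on.
def Pre_choose_next (curr : List Int) (boulderX : Int) (boulderY : Int) : Prop :=
  (0 ≤ boulderX ∧ boulderX ≤ curr.length) ∨
  (∀ x ∈ PySem.List.pyRange 0 curr.length 1,
    ∀ y ∈ curr ++ PySem.List.pyRange 0 curr.length 1,
      y ≠ boulderY ∧ |x - boulderX| ≠ |y - boulderY|)
instance (curr : List Int) (boulderX : Int) (boulderY : Int) : Decidable (Pre_choose_next curr boulderX boulderY) := by unfold Pre_choose_next; infer_instance

def pvWitness_choose_next : List Int × Int × Int := ([0, 2, 1], 1, 1)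

def Spec_choose_next (curr : List Int) (boulderX : Int) (boulderY : Int) (out : Option (List Int)) : Prop := out = choose_next_alt curr boulderX boulderY
instance (curr : List Int) (boulderX : Int) (boulderY : Int) (out : Option (List Int)) : Decidable (Spec_choose_next curr boulderX boulderY out) := by unfold Spec_choose_next; infer_instance

-- ===== CLAIM (what is proved, stated in full; the proofs are below) =====
def Claim_equal_choose_next : Prop := ∀ (curr : List Int) (boulderX : Int) (boulderY : Int), Dom_choose_next curr boulderX boulderY → Pre_choose_next curr boulderX boulderY → Spec_choose_next curr boulderX boulderY (choose_next curr boulderX boulderY)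

-- ===== LEMMAS AND PROOFS =====

def better (g : List Int → Int) (a b : List Int) : Prop :=
  g a < g b ∨ (g a = g b ∧ a < b)
theorem better_irrefl (g : List Int → Int) (a : List Int) : ¬ better g a a := by
  rintro (h | ⟨-, h⟩) <;> exact lt_irrefl _ h
theorem better_asymm (g : List Int → Int) (a b : List Int) :
    better g a b → better g b a → False := by
  rintro (h1 | ⟨h1, h1'⟩) (h2 | ⟨h2, h2'⟩) <;> first | omega | exact absurd h2' (lt_asymm h1')
theorem better_trans (g : List Int → Int) (a b c : List Int) :
    better g a b → better g b c → better g a c := by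
  rintro (h1 | ⟨h1, h1'⟩) (h2 | ⟨h2, h2'⟩)
  · exact Or.inl (by omega)
  · exact Or.inl (by omega)
  · exact Or.inl (by omega)
  · exact Or.inr ⟨by omega, lt_trans h1' h2'⟩
theorem better_total (g : List Int → Int) (a b : List Int) (h : a ≠ b) :
    better g a b ∨ better g b a := by
  rcases lt_trichotomy (g a) (g b) with hg | hg | hg
  · exact Or.inl (Or.inl hg)
  · rcases lt_trichotomy a b with hl | hl | hl
    · exact Or.inl (Or.inr ⟨hg, hl⟩)
    · exact absurd hl h
    · exact Or.inr (Or.inr ⟨hg.symm, hl⟩)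
  · exact Or.inr (Or.inl hg)

def IsMinOf (g : List Int → Int) (S : List (List Int)) (m : List Int) : Prop :=
  m ∈ S ∧ ∀ y ∈ S, ¬ better g y m

theorem isMinOf_unique (g : List Int → Int) (S T : List (List Int)) (m m' : List Int)
    (hmem : ∀ z, z ∈ S ↔ z ∈ T) (h1 : IsMinOf g S m) (h2 : IsMinOf g T m') : m = m' := by
  by_contra hne
  rcases better_total g m m' hne with h | h
  · exact h2.2 m ((hmem m).mp h1.1) h
  · exact h1.2 m' ((hmem m').mpr h2.1) h

theorem scan_frozen (g : List Int → Int) (l : List (List Int)) (t : Int) (s : List Int)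
    (h : ∀ y ∈ l, ¬ g y ≤ t) :
    l.foldl (fun p x => if g x ≤ p.1 then (g x, x) else p) (t, s) = (t, s) := by
  induction l with
  | nil => rfl
  | cons x l ih =>
    simp only [List.foldl_cons, if_neg (h x (by simp))]
    exact ih (fun y hy => h y (by simp [hy]))

theorem scan_min (g : List Int → Int) (l : List (List Int)) (t0 : Int) (s0 : List Int)
    (hp : l.Pairwise (fun a b => b ≤ a)) (hw : ∃ x ∈ l, g x ≤ t0) :
    ∃ m, l.foldl (fun p x => if g x ≤ p.1 then (g x, x) else p) (t0, s0) = (g m, m) ∧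
      IsMinOf g l m := by
  induction l generalizing t0 s0 with
  | nil => simp at hw
  | cons x l ih =>
    have hhead : ∀ y ∈ l, y ≤ x := fun y hy => List.rel_of_pairwise_cons hp hy
    have htail := hp.of_cons
    by_cases h : g x ≤ t0
    · simp only [List.foldl_cons, if_pos h]
      by_cases h2 : ∃ y ∈ l, g y ≤ g x
      · obtain ⟨m, hm1, hm2⟩ := ih (g x) x htail h2
        refine ⟨m, hm1, List.mem_cons_of_mem _ hm2.1, ?_⟩
        intro y hy
        rcases List.mem_cons.mp hy with rfl | hy'
        · -- y = x
          obtain ⟨y0, hy0, hy0le⟩ := h2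
          have hy0m : ¬ better g y0 m := hm2.2 y0 hy0
          have hgm : g m ≤ g y0 := by
            by_contra hlt
            exact hy0m (Or.inl (by omega))
          rintro (hb | ⟨hb, hb'⟩)
          · omega
          · exact absurd hb' (not_lt.mpr (hhead m hm2.1))
        · exact hm2.2 y hy'
      · push Not at h2
        rw [scan_frozen g l (g x) x (fun y hy => by have := h2 y hy; omega)]
        refine ⟨x, rfl, List.mem_cons_self, ?_⟩
        intro y hy
        rcases List.mem_cons.mp hy with rfl | hy'
        · exact better_irrefl g y
        · have := h2 y hy'
          rintro (hb | ⟨hb, hb'⟩) <;> omega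
    · simp only [List.foldl_cons, if_neg h]
      obtain ⟨x0, hx0, hx0le⟩ := hw
      have hx0l : x0 ∈ l := by
        rcases List.mem_cons.mp hx0 with rfl | h' ; · omega
        exact h'
      obtain ⟨m, hm1, hm2⟩ := ih t0 s0 htail ⟨x0, hx0l, hx0le⟩
      refine ⟨m, hm1, List.mem_cons_of_mem _ hm2.1, ?_⟩
      intro y hy
      rcases List.mem_cons.mp hy with rfl | hy'
      · have hgm : g m ≤ g x0 := by
          by_contra hlt
          exact hm2.2 x0 hx0l (Or.inl (by omega))
        rintro (hb | ⟨hb, hb'⟩) <;> omega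
      · exact hm2.2 y hy'

theorem fold_min (g : List Int → Int) (l : List (List Int)) (b : List Int) :
    ∃ m, l.foldl (fun p c => if g c < p.1 ∨ (g c = p.1 ∧ c < p.2) then (g c, c) else p)
        (g b, b) = (g m, m) ∧ IsMinOf g (b :: l) m := by
  induction l generalizing b with
  | nil =>
    exact ⟨b, rfl, List.mem_cons_self, by
      intro y hy; rcases List.mem_cons.mp hy with rfl | h
      · exact better_irrefl g y
      · simp at h⟩
  | cons c l ih =>
    simp only [List.foldl_cons]
    by_cases hc : g c < g b ∨ (g c = g b ∧ c < b)
    · rw [if_pos hc]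
      obtain ⟨m, hm1, hm2⟩ := ih c
      refine ⟨m, hm1, ?_, ?_⟩
      · rcases List.mem_cons.mp hm2.1 with rfl | h
        · exact List.mem_cons_of_mem _ List.mem_cons_self
        · exact List.mem_cons_of_mem _ (List.mem_cons_of_mem _ h)
      · intro y hy
        rcases List.mem_cons.mp hy with rfl | hy'
        · -- y = b : better b m impossible
          intro hb
          have hcm : ¬ better g c m := hm2.2 c List.mem_cons_self
          by_cases hmc : m = c
          · subst hmc; exact better_asymm g y m hb hc
          · rcases better_total g m c hmc with h' | h'
            · exact better_asymm g y c (better_trans g y m c hb h') hc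
            · exact hcm h'
        · exact hm2.2 y hy'
    · rw [if_neg hc]
      obtain ⟨m, hm1, hm2⟩ := ih b
      refine ⟨m, hm1, ?_, ?_⟩
      · rcases List.mem_cons.mp hm2.1 with rfl | h
        · exact List.mem_cons_self
        · exact List.mem_cons_of_mem _ (List.mem_cons_of_mem _ h)
      · intro y hy
        have hbm : ¬ better g b m := hm2.2 b List.mem_cons_self
        rcases List.mem_cons.mp hy with rfl | hy'
        · exact hbm
        rcases List.mem_cons.mp hy' with rfl | hy''
        · -- y = c
          intro hcm2
          by_cases hcb2 : y = b
          · subst hcb2; exact hbm hcm2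
          · rcases better_total g y b hcb2 with h' | h'
            · exact hc h'
            · exact hbm (better_trans g b y m h' hcm2)
        · exact hm2.2 y (List.mem_cons_of_mem _ hy'')

theorem line_eq_one_iff (corY corX : Int) (state : List Int) (bX bY : Int) :
    line_attack corY corX state bX bY = 1 ↔
    ((corY = bY ∧ ((corX < bX ∧ (PySem.List.pyRange 0 (bX - 1) 1).any
        (fun i => decide (PySem.List.pyGetD state i 0 = corY ∧ i ≠ corX)) = true) ∨
      (corX > bX ∧ (PySem.List.pyRange (bX + 1) (PySem.List.len state) 1).any
        (fun j => decide (PySem.List.pyGetD state j 0 = corY ∧ j ≠ corX)) = true))) ∨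
     (corY ≠ bY ∧ PySem.List.count state corY ≥ 2)) := by
  unfold line_attack
  split_ifs with h1 h2 h3 h4 <;> simp_all
  tauto

theorem diag_eq_one_iff (corY corX : Int) (state : List Int) (bX bY : Int) :
    diagonal_attack corY corX state bX bY = 1 ↔
    ((|corX - bX| = |corY - bY| ∧ ((corX < bX ∧ (PySem.List.pyRange 0 bX 1).any
        (fun i => decide (|PySem.List.pyGetD state i 0 - corY| = |i - corX| ∧ corX ≠ i)) = true) ∨
      (corX > bX ∧ (PySem.List.pyRange bX (PySem.List.len state) 1).any
        (fun j => decide (|PySem.List.pyGetD state j 0 - corY| = |j - corX| ∧ corX ≠ j)) = true))) ∨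
     (¬ |corX - bX| = |corY - bY| ∧ (PySem.List.pyRange 0 (PySem.List.len state) 1).any
        (fun j => decide (|PySem.List.pyGetD state j 0 - corY| = |j - corX| ∧ corX ≠ j)) = true)) := by
  unfold diagonal_attack
  split_ifs with h1 h2 h3 h4 <;> simp_all <;> tauto

theorem attacked_iff (state : List Int) (corX bX bY : Int) :
    attacked state corX bX bY = true ↔
    (line_attack (PySem.List.pyGetD state corX 0) corX state bX bY = 1 ∨
     diagonal_attack (PySem.List.pyGetD state corX 0) corX state bX bY = 1) := by
  rw [line_eq_one_iff, diag_eq_one_iff]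
  unfold attacked
  dsimp only
  split_ifs with h1 h2 h3 <;> simp_all

theorem f_eq_conflicts (state : List Int) (bX bY : Int) :
    f state bX bY = conflicts state bX bY := by
  unfold f conflicts
  rw [PySem.List.foldl_congr_mem
    (g := fun (count : Int) i => count + (if attacked state i bX bY then (1 : Int) else 0))]
  · rw [PySem.List.foldl_add]
    simp
  · intro acc x _
    dsimp only
    by_cases hl : line_attack (PySem.List.pyGetD state x 0) x state bX bY = 1 <;>
      by_cases hd : diagonal_attack (PySem.List.pyGetD state x 0) x state bX bY = 1 <;>
        simp [hl, hd, attacked_iff]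

theorem set_eq_self_iff' (l : List Int) (k : Nat) (v : Int) (h : k < l.length) :
    l.set k v = l ↔ l[k] = v := by
  constructor
  · intro he
    have h2 := congrArg (fun t => t[k]?) he
    simp [h] at h2
    exact h2.symm
  · intro he
    apply List.ext_getElem
    · simp
    · intro i h1 h2
      rw [List.getElem_set]
      split_ifs with hik
      · subst hik; exact he.symm
      · rfl

theorem is_boulder_eq_one_iff (i j bX bY : Int) :
    is_boulder i j bX bY = 1 ↔ ¬(i = bX ∧ j = bY) := by
  unfold is_boulder
  split_ifs <;> simp_all

theorem succ_inner (state : List Int) (bX bY i : Int) (js : List Int) (acc : List (List Int)) :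
    js.foldl (fun (p : List (List Int) × List Int) j =>
        if is_boulder i j bX bY = 1 then
          let new_state := PySem.List.pySetD p.2 i j
          let temp := [] ++ new_state
          let list1 := if temp ≠ state then p.1 ++ [temp] else p.1
          (list1, [] ++ state)
        else p) (acc, [] ++ state)
    = (acc ++ (js.filter (fun j =>
          decide (is_boulder i j bX bY = 1 ∧ PySem.List.pySetD state i j ≠ state))).map
        (fun j => PySem.List.pySetD state i j), [] ++ state) := by
  induction js generalizing acc with
  | nil => simp
  | cons j js ih =>
    simp only [List.foldl_cons, List.nil_append] at *
    by_cases hb : is_boulder i j bX bY = 1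
    · by_cases hne : PySem.List.pySetD state i j ≠ state
      · rw [if_pos hb, if_pos hne, ih]
        simp [hb, hne]
      · rw [if_pos hb, if_neg hne, ih]
        simp [hb, hne]
    · rw [if_neg hb, ih]
      simp [hb]

theorem succ_mem (state : List Int) (bX bY : Int) (x : List Int) :
    x ∈ succ_state_helper state bX bY ↔
    ∃ i, (0 ≤ i ∧ i < PySem.List.len state) ∧ ∃ j, (0 ≤ j ∧ j < PySem.List.len state) ∧
      is_boulder i j bX bY = 1 ∧ PySem.List.pySetD state i j ≠ state ∧
      x = PySem.List.pySetD state i j := by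
  unfold succ_state_helper
  rw [PySem.List.mem_sorted]
  have houter : ∀ (is : List Int) (acc : List (List Int)),
      (is.foldl (fun (p : List (List Int) × List Int) i =>
        (PySem.List.pyRange 0 (PySem.List.len state) 1).foldl
          (fun (p : List (List Int) × List Int) j =>
            if is_boulder i j bX bY = 1 then
              let new_state := PySem.List.pySetD p.2 i j
              let temp := [] ++ new_state
              let list1 := if temp ≠ state then p.1 ++ [temp] else p.1
              (list1, [] ++ state)
            else p) p) (acc, [] ++ state))
      = (acc ++ is.flatMap (fun i =>
          ((PySem.List.pyRange 0 (PySem.List.len state) 1).filter (fun j =>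
            decide (is_boulder i j bX bY = 1 ∧ PySem.List.pySetD state i j ≠ state))).map
            (fun j => PySem.List.pySetD state i j)), [] ++ state) := by
    intro is
    induction is with
    | nil => simp
    | cons i is ih =>
      intro acc
      simp only [List.foldl_cons]
      rw [succ_inner, ih, List.flatMap_cons, List.append_assoc]
  rw [houter]
  simp only [List.nil_append, List.mem_flatMap, List.mem_map, List.mem_filter,
    PySem.List.mem_pyRange_one, decide_eq_true_eq]
  constructor
  · rintro ⟨i, hi, j, ⟨hj, hcond⟩, rfl⟩
    exact ⟨i, hi, j, hj, hcond.1, hcond.2, rfl⟩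
  · rintro ⟨i, hi, j, hj, h1, h2, rfl⟩
    exact ⟨i, hi, j, ⟨hj, h1, h2⟩, rfl⟩

theorem srt_eq (l : List (List Int)) :
    (@PySem.List.sorted (List Int) (List Int) List.instLT (fun a b => a.decidableLT b) l (fun x => x) true)
    = (@PySem.List.sorted (List Int) (List Int) List.instLinearOrder.toLT LinearOrder.toDecidableLT l (fun x => x) true) := by
  rw [@PySem.List.sorted_rev_eq_foldl_insertBy _ _ List.instLT (fun a b => a.decidableLT b) l (fun x => x),
      @PySem.List.sorted_rev_eq_foldl_insertBy _ _ List.instLinearOrder.toLT LinearOrder.toDecidableLT l (fun x => x)]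
  congr 1
  funext acc x
  congr 1
  funext a b
  exact decide_eq_decide.mpr Iff.rfl

theorem sorted_pairwise_desc (l : List (List Int)) :
    (PySem.List.sorted l (fun x => x) true).Pairwise (fun a b => b ≤ a) := by
  rw [srt_eq]
  exact PySem.List.sorted_pairwise_rev l (fun x => x)

-- B's generated candidates for a fixed row i
def candsOf (curr : List Int) (bX bY i : Int) : List (List Int) :=
  ((PySem.List.pyRange 0 (PySem.List.len curr) 1).filter (fun j =>
      decide (¬((i = bX ∧ j = bY) ∨ j = PySem.List.pyGetD curr i 0)))).map
    (fun j => PySem.List.slice curr none (some i) ++ [j] ++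
              PySem.List.slice curr (some (i + 1)) none)

theorem alt_inner (curr : List Int) (bX bY i : Int) (p : Int × List Int) :
    (PySem.List.pyRange 0 (PySem.List.len curr) 1).foldl (fun (p : Int × List Int) j =>
        if (i = bX ∧ j = bY) ∨ j = PySem.List.pyGetD curr i 0 then p
        else
          let cand := PySem.List.slice curr none (some i) ++ [j] ++
                      PySem.List.slice curr (some (i + 1)) none
          let fc := conflicts cand bX bY
          if fc < p.1 ∨ (fc = p.1 ∧ cand < p.2) then (fc, cand) else p) p
    = (candsOf curr bX bY i).foldl (fun (p : Int × List Int) c =>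
        if conflicts c bX bY < p.1 ∨ (conflicts c bX bY = p.1 ∧ c < p.2)
        then (conflicts c bX bY, c) else p) p := by
  unfold candsOf
  rw [List.foldl_map, ← PySem.List.foldl_ite_eq_foldl_filter]
  apply PySem.List.foldl_congr_mem
  intro acc x _
  by_cases hs : (i = bX ∧ x = bY) ∨ x = PySem.List.pyGetD curr i 0
  · rw [if_pos hs, if_neg (not_not_intro hs)]
  · rw [if_neg hs, if_pos hs]

theorem cand_eq_set (curr : List Int) (i j : Int) (h0 : 0 ≤ i) (h1 : i < PySem.List.len curr) :
    PySem.List.slice curr none (some i) ++ [j] ++ PySem.List.slice curr (some (i + 1)) none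
    = PySem.List.pySetD curr i j := by
  have hlt : i.toNat < curr.length := by
    simp [PySem.List.len_eq] at h1; omega
  rw [PySem.List.slice_to curr h0, PySem.List.slice_from curr (by omega : (0:Int) ≤ i + 1),
    PySem.List.pySetD_of_nonneg curr j h0]
  have h2 : (i + 1).toNat = i.toNat + 1 := by omega
  rw [h2, List.set_eq_take_append_cons_drop, if_pos hlt]
  simp

theorem setD_ne_iff (curr : List Int) (i j : Int) (h0 : 0 ≤ i) (h1 : i < PySem.List.len curr) :
    PySem.List.pySetD curr i j ≠ curr ↔ ¬ j = PySem.List.pyGetD curr i 0 := by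
  have hlt : i.toNat < curr.length := by
    simp [PySem.List.len_eq] at h1; omega
  rw [PySem.List.pySetD_of_nonneg curr j h0,
    PySem.List.pyGetD_eq_getElem curr 0 h0 (by simp [PySem.List.len_eq] at h1 ⊢; omega)]
  rw [not_iff_not]
  rw [set_eq_self_iff' curr i.toNat j hlt]
  exact eq_comm

theorem mem_equiv (curr : List Int) (bX bY : Int) (z : List Int) :
    z ∈ PySem.List.sorted (succ_state_helper curr bX bY ++ [curr]) (fun x => x) true ↔
    z ∈ curr :: (PySem.List.pyRange 0 (PySem.List.len curr) 1).flatMap (candsOf curr bX bY) := by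
  rw [PySem.List.mem_sorted]
  simp only [List.mem_append, List.mem_cons, List.mem_flatMap,
    List.not_mem_nil, or_false]
  rw [succ_mem]
  constructor
  · rintro (⟨i, hi, j, hj, hb, hne, rfl⟩ | rfl)
    · refine Or.inr ⟨i, by rw [PySem.List.mem_pyRange_one]; exact hi, ?_⟩
      unfold candsOf
      simp only [List.mem_map, List.mem_filter, PySem.List.mem_pyRange_one, decide_eq_true_eq]
      refine ⟨j, ⟨hj, ?_⟩, by rw [cand_eq_set curr i j hi.1 hi.2]⟩
      rw [is_boulder_eq_one_iff] at hb
      have := (setD_ne_iff curr i j hi.1 hi.2).mp hne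
      tauto
    · exact Or.inl rfl
  · rintro (rfl | ⟨i, hi, hz⟩)
    · exact Or.inr rfl
    · rw [PySem.List.mem_pyRange_one] at hi
      unfold candsOf at hz
      simp only [List.mem_map, List.mem_filter, PySem.List.mem_pyRange_one,
        decide_eq_true_eq] at hz
      obtain ⟨j, ⟨hj, hcond⟩, rfl⟩ := hz
      refine Or.inl ⟨i, hi, j, hj, ?_, ?_, by rw [cand_eq_set curr i j hi.1 hi.2]⟩
      · rw [is_boulder_eq_one_iff]; tauto
      · rw [setD_ne_iff curr i j hi.1 hi.2]; tauto

-- ===== VERDICT (by name: the statement is the Claim_ definition above) =====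
theorem choose_next_spec : Claim_equal_choose_next := by
  unfold Claim_equal_choose_next
  intro curr bX bY _ _
  unfold Spec_choose_next choose_next choose_next_alt
  dsimp only [List.nil_append]
  simp only [ite_self, ge_iff_le]
  simp only [alt_inner]
  rw [← List.foldl_flatMap]
  have hg : (fun s => f s bX bY) = (fun s => conflicts s bX bY) :=
    funext fun s => f_eq_conflicts s bX bY
  have hcurrL : curr ∈ PySem.List.sorted (succ_state_helper curr bX bY ++ [curr]) (fun x => x) true :=
    (mem_equiv curr bX bY curr).mpr List.mem_cons_self
  obtain ⟨mA, hA1, hA2⟩ := scan_min (fun s => f s bX bY)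
    (PySem.List.sorted (succ_state_helper curr bX bY ++ [curr]) (fun x => x) true)
    (f curr bX bY) [] (sorted_pairwise_desc _) ⟨curr, hcurrL, le_refl _⟩
  obtain ⟨mB, hB1, hB2⟩ := fold_min (fun s => conflicts s bX bY)
    ((PySem.List.pyRange 0 (PySem.List.len curr) 1).flatMap (candsOf curr bX bY)) curr
  rw [hA1, hB1]
  rw [hg] at hA2
  have hm : mA = mB := isMinOf_unique (fun s => conflicts s bX bY) _ _ mA mB
    (mem_equiv curr bX bY) hA2 hB2
  rw [hm]
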